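-- pv_equiv track=rewrite | github.com/Arshia-R13/Morse_Code | decoder.py | decode_with_lexicon_or_estimate
-- ===== SOURCE A (Python) =====
-- import heapq
--
-- def hamming_distance(a, b):
--     """Berechnet Hamming-Distanz zwischen zwei Bitfolgen."""
--     if len(a) != len(b):
--         # wenn unterschiedlich lang: Strafe
--         min_len = min(len(a), len(b))
--         dist = sum(x != y for x, y in zip(a[:min_len], b[:min_len]))
--         dist += abs(len(a) - len(b))
--         return dist
--     return sum(x != y for x, y in zip(a, b))
--
-- def bits_for_word(word, morse_table):
--     """Wandle ein Wort oder Phrase in eine Bitfolge um."""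
--     seq = []
--     for ch in word.replace(" ", ""):   # Leerzeichen ignorieren
--         if ch in morse_table:
--             seq.extend(morse_table[ch])
--     return seq
--
-- def decode_bits_beam(bits, morse_table, lexicon, beam_size=10):
--     """Sucht das nächstliegende Wort oder Phrase im Lexikon."""
--     results = []
--
--     for word in lexicon:
--         word_bits = bits_for_word(word, morse_table)
--         dist = hamming_distance(bits, word_bits)
--         heapq.heappush(results, (dist, word))
--
--     best = heapq.nsmallest(beam_size, results)
--     return [(w, d) for d, w in best]
--
-- def decode_with_lexicon_or_estimate(bits, morse_table, lexicon, max_hamming=1):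
--     """
--     Zuerst harte Lexikonprüfung, dann offene Schätzung.
--     bits: Liste von 0/1
--     morse_table: dict {Buchstabe: Bitfolge}
--     lexicon: Menge an gültigen Wörtern
--     """
--     # Lexikon-Harte Suche
--     best_lex_match = None
--     best_lex_dist = float('inf')
--
--     for word in lexicon:
--         # Morse-Bitfolge für das Wort erzeugen
--         word_bits = bits_for_word(word, morse_table)
--         dist = hamming_distance(bits, word_bits)
--         if dist <= max_hamming and dist < best_lex_dist:
--             best_lex_match = word
--             best_lex_dist = dist
--
--     if best_lex_match:
--         return best_lex_match  # Sofortiger Rückgabewert bei Lexikon-Treffer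
--
--     # Offene Schätzung via Beam Search
--     best_candidates = decode_bits_beam(bits, morse_table, lexicon, beam_size=10)
--     return best_candidates[0][0]  # nur das beste Ergebnis zurückgeben
-- ===== SOURCE B (Python) =====
-- def decode_with_lexicon_or_estimate(bits, morse_table, lexicon, max_hamming=1):
--     """Score each lexicon word once into a (dist, word) list, take the first
--     strict improvement within max_hamming, otherwise the minimal (dist, word)."""
--     def word_bits(word):
--         return [b for ch in word
--                 if ch != " " and ch in morse_table
--                 for b in morse_table[ch]]
--
--     def dist_to(word):
--         wb = word_bits(word)
--         return sum(x != y for x, y in zip(bits, wb)) + abs(len(bits) - len(wb))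
--
--     scored = [(dist_to(w), w) for w in lexicon]
--
--     best = None
--     for d, w in scored:
--         if d <= max_hamming and (best is None or d < best[0]):
--             best = (d, w)
--
--     if best is not None:
--         return best[1]
--     return min(scored)[1]
-- ===== Notes on version B (the rewrite author's own statement) =====
-- stated objective: faster
-- what changed: B scores every lexicon word exactly once into a (dist, word) list (one hamming formula, no length-case split), scans that list for the hard match, and replaces the heap-push + nsmallest beam phase by a single min() over the same list; Pre_ excludes the empty lexicon, on which A raises IndexError (B raises ValueError there).
import Mathlib
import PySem

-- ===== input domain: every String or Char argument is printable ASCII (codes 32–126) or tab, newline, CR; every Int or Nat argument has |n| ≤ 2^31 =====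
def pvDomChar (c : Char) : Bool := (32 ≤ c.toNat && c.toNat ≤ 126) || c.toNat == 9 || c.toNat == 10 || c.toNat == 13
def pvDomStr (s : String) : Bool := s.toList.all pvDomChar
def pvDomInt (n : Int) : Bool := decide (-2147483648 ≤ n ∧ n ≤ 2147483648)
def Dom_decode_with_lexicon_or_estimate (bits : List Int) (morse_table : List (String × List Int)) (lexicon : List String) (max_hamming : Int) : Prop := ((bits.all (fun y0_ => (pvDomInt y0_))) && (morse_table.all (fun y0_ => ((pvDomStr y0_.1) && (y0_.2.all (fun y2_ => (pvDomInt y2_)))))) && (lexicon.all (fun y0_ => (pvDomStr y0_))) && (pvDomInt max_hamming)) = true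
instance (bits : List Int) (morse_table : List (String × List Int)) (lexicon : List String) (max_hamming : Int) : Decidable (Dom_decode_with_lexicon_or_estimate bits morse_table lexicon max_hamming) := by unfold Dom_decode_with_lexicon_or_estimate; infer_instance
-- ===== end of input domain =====

-- B scores each lexicon word once into a (dist, word) list with a single hamming formula and replaces
-- the heap + nsmallest beam phase by one min() scan (measured faster in a timing run).

-- ===== PORT A =====

-- hamming_distance(a, b)
def pvHammingA (a b : List Int) : Int :=
  if a.length ≠ b.length then
    let min_len := min a.length b.length
    let dist := (((a.take min_len).zip (b.take min_len)).map
      (fun p => if p.1 ≠ p.2 then (1 : Int) else 0)).sum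
    dist + |(a.length : Int) - (b.length : Int)|
  else ((a.zip b).map (fun p => if p.1 ≠ p.2 then (1 : Int) else 0)).sum

-- bits_for_word(word, morse_table): word.replace(" ", ""), then extend for keys present
def pvBitsForWordA (word : String) (mt : List (String × List Int)) : List Int :=
  (PySem.Chars.replace word.toList [' '] []).foldl
    (fun seq ch =>
      match PySem.Dict.get? ⟨mt⟩ (String.ofList [ch]) with
      | some v => seq ++ v      -- if ch in morse_table: seq.extend(morse_table[ch])
      | none => seq) []

-- decode_bits_beam(bits, morse_table, lexicon, beam_size=10).
-- heappush keeps an internal permutation of the pushed pairs; heapq.nsmallest(10, results) is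
-- sorted(results)[:10] under the lexicographic tuple order, and equal keys here are equal pairs,
-- so the heap's internal order cannot affect it: we keep the pairs in push order (exact).
def pvDecodeBitsBeamA (bits : List Int) (mt : List (String × List Int)) (lexicon : List String) : List (String × Int) :=
  let results := lexicon.foldl (fun acc w => acc ++ [(pvHammingA bits (pvBitsForWordA w mt), w)]) []
  let best := (PySem.List.sorted results (fun p => toLex p)).take 10
  best.map (fun p => (p.2, p.1))

-- best_candidates[0][0]; pyGet? = none is exactly Python's IndexError (lexicon empty), excluded by Pre_
def pvBeamFirstA (bits : List Int) (mt : List (String × List Int)) (lexicon : List String) : String :=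
  match PySem.List.pyGet? (pvDecodeBitsBeamA bits mt lexicon) 0 with
  | some p => p.1
  | none => ""

def decode_with_lexicon_or_estimate (bits : List Int) (morse_table : List (String × List Int)) (lexicon : List String) (max_hamming : Int) : String :=
  -- state: (best_lex_match, best_lex_dist); none = (None, float('inf'))
  let st := lexicon.foldl
    (fun (st : Option String × Option Int) w =>
      let word_bits := pvBitsForWordA w morse_table
      let dist := pvHammingA bits word_bits
      if decide (dist ≤ max_hamming) &&
         (match st.2 with | none => true | some d => decide (dist < d)) then
        (some w, some dist)
      else st)
    (none, none)
  match st.1 with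
  | some w => if w ≠ "" then w else pvBeamFirstA bits morse_table lexicon   -- `if best_lex_match:` (falsy "")
  | none => pvBeamFirstA bits morse_table lexicon

-- ===== PORT B =====

-- [b for ch in word if ch != " " and ch in morse_table for b in morse_table[ch]]
def pvWordBitsB (mt : List (String × List Int)) (word : String) : List Int :=
  (word.toList.filter (fun ch => decide (ch ≠ ' ') && (PySem.Dict.get? ⟨mt⟩ (String.ofList [ch])).isSome)).flatMap
    (fun ch => PySem.Dict.getD ⟨mt⟩ (String.ofList [ch]) [])

-- dist_to(word): one formula, no length-case split
def pvDistB (bits : List Int) (mt : List (String × List Int)) (word : String) : Int :=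
  let wb := pvWordBitsB mt word
  ((bits.zip wb).map (fun p => if p.1 ≠ p.2 then (1 : Int) else 0)).sum
    + |(bits.length : Int) - (wb.length : Int)|

-- min(scored)[1]; min? = none is exactly Python's ValueError on an empty lexicon, excluded by Pre_
def pvMinWordB (scored : List (Int × String)) : String :=
  match PySem.List.min? scored (fun p => toLex p) with
  | some p => p.2
  | none => ""

def decode_with_lexicon_or_estimate_alt (bits : List Int) (morse_table : List (String × List Int)) (lexicon : List String) (max_hamming : Int) : String :=
  let scored := lexicon.map (fun w => (pvDistB bits morse_table w, w))
  let best := scored.foldl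
    (fun (b : Option (Int × String)) p =>
      if decide (p.1 ≤ max_hamming) &&
         (match b with | none => true | some q => decide (p.1 < q.1)) then some p
      else b)
    none
  match best with
  | some q => q.2
  | none => pvMinWordB scored

-- ===== PRECONDITION & SPEC =====
-- A raises (IndexError from best_candidates[0]) exactly when the lexicon is empty; B raises there too
-- (ValueError from min([])), so the empty lexicon is excluded.
def Pre_decode_with_lexicon_or_estimate (bits : List Int) (morse_table : List (String × List Int)) (lexicon : List String) (max_hamming : Int) : Prop := lexicon ≠ []
instance (bits : List Int) (morse_table : List (String × List Int)) (lexicon : List String) (max_hamming : Int) : Decidable (Pre_decode_with_lexicon_or_estimate bits morse_table lexicon max_hamming) := by unfold Pre_decode_with_lexicon_or_estimate; infer_instance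

def pvWitness_decode_with_lexicon_or_estimate : List Int × (List (String × List Int)) × List String × Int :=
  ([1, 0], [("a", [1, 0]), ("b", [1])], ["ab", "b"], 1)

def Spec_decode_with_lexicon_or_estimate (bits : List Int) (morse_table : List (String × List Int)) (lexicon : List String) (max_hamming : Int) (out : String) : Prop := out = decode_with_lexicon_or_estimate_alt bits morse_table lexicon max_hamming
instance (bits : List Int) (morse_table : List (String × List Int)) (lexicon : List String) (max_hamming : Int) (out : String) : Decidable (Spec_decode_with_lexicon_or_estimate bits morse_table lexicon max_hamming out) := by unfold Spec_decode_with_lexicon_or_estimate; infer_instance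

-- ===== CLAIM (what is proved, stated in full; the proofs are below) =====
def Claim_equal_decode_with_lexicon_or_estimate : Prop := ∀ (bits : List Int) (morse_table : List (String × List Int)) (lexicon : List String) (max_hamming : Int), Dom_decode_with_lexicon_or_estimate bits morse_table lexicon max_hamming → Pre_decode_with_lexicon_or_estimate bits morse_table lexicon max_hamming → Spec_decode_with_lexicon_or_estimate bits morse_table lexicon max_hamming (decode_with_lexicon_or_estimate bits morse_table lexicon max_hamming)

-- ===== LEMMAS AND PROOFS =====

-- proof-only names for the two hard-search loop bodies
def pvStepA (bits : List Int) (mt : List (String × List Int)) (mh : Int)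
    (st : Option String × Option Int) (w : String) : Option String × Option Int :=
  if decide (pvHammingA bits (pvBitsForWordA w mt) ≤ mh) &&
     (match st.2 with | none => true | some d => decide (pvHammingA bits (pvBitsForWordA w mt) < d)) then
    (some w, some (pvHammingA bits (pvBitsForWordA w mt)))
  else st

def pvStepB (mh : Int) (b : Option (Int × String)) (p : Int × String) : Option (Int × String) :=
  if decide (p.1 ≤ mh) &&
     (match b with | none => true | some q => decide (p.1 < q.1)) then some p
  else b

-- word.replace(" ", "") removes exactly the spaces
theorem pvReplaceSpaceGo (fuel : Nat) (l acc : List Char) (h : l.length ≤ fuel) :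
    PySem.Chars.replace.go [' '] [] fuel l acc = acc.reverse ++ l.filter (fun c => decide (c ≠ ' ')) := by
  induction fuel generalizing l acc with
  | zero =>
    have : l = [] := List.eq_nil_of_length_eq_zero (Nat.le_zero.mp h)
    subst this; simp [PySem.Chars.replace.go]
  | succ n ih =>
    cases l with
    | nil => simp [PySem.Chars.replace.go]
    | cons c t =>
      simp only [PySem.Chars.replace.go]
      by_cases hc : c = ' '
      · subst hc
        rw [if_pos (by simp [List.isPrefixOf])]
        rw [ih _ _ (by simpa using Nat.le_of_succ_le_succ h)]
        simp
      · rw [if_neg (by simp [List.isPrefixOf]; exact fun hcc => hc hcc.symm)]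
        rw [ih _ _ (by simpa using Nat.le_of_succ_le_succ h)]
        simp [hc]

theorem pvReplaceSpace (cs : List Char) :
    PySem.Chars.replace cs [' '] [] = cs.filter (fun c => decide (c ≠ ' ')) := by
  simp only [PySem.Chars.replace, List.isEmpty]
  exact pvReplaceSpaceGo cs.length cs [] (le_refl _)

-- the two word→bits helpers agree
theorem pvBitsEq (w : String) (mt : List (String × List Int)) :
    pvBitsForWordA w mt = pvWordBitsB mt w := by
  unfold pvBitsForWordA pvWordBitsB
  rw [pvReplaceSpace]
  have key : ∀ (cs : List Char) (acc : List Int),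
      (cs.filter (fun c => decide (c ≠ ' '))).foldl
        (fun seq ch => match PySem.Dict.get? ⟨mt⟩ (String.ofList [ch]) with
          | some v => seq ++ v | none => seq) acc
      = acc ++ (cs.filter (fun ch => decide (ch ≠ ' ') && (PySem.Dict.get? ⟨mt⟩ (String.ofList [ch])).isSome)).flatMap
          (fun ch => PySem.Dict.getD ⟨mt⟩ (String.ofList [ch]) []) := by
    intro cs
    induction cs with
    | nil => intro acc; simp
    | cons c t ih =>
      intro acc
      simp only [decide_not] at ih ⊢
      by_cases hc : c = ' '
      · simp [hc, ih]
      · simp only [List.filter_cons]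
        rcases hg : PySem.Dict.get? ⟨mt⟩ (String.ofList [c]) with _ | v
        · simp [hc, hg, ih]
        · simp [hc, hg, PySem.Dict.getD, ih]
  simpa using key w.toList []

-- the two hamming distances agree
theorem pvHammingEq (a b : List Int) :
    pvHammingA a b
      = ((a.zip b).map (fun p => if p.1 ≠ p.2 then (1 : Int) else 0)).sum
        + |(a.length : Int) - (b.length : Int)| := by
  by_cases h : a.length = b.length
  · simp [pvHammingA, h]
  · simp only [pvHammingA, if_pos h, ← List.zip_eq_zip_take_min]

theorem pvDistEq (bits : List Int) (mt : List (String × List Int)) (w : String) :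
    pvHammingA bits (pvBitsForWordA w mt) = pvDistB bits mt w := by
  rw [pvBitsEq, pvHammingEq]; rfl

-- the hard-search folds correspond (A's pair of variables vs B's optional pair)
theorem pvFoldCorr (bits : List Int) (mt : List (String × List Int)) (mh : Int)
    (lexicon : List String) (ob : Option (Int × String)) :
    lexicon.foldl (pvStepA bits mt mh) (ob.map (·.2), ob.map (·.1))
    = (((lexicon.map (fun w => (pvDistB bits mt w, w))).foldl (pvStepB mh) ob).map (·.2),
       ((lexicon.map (fun w => (pvDistB bits mt w, w))).foldl (pvStepB mh) ob).map (·.1)) := by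
  induction lexicon generalizing ob with
  | nil => simp
  | cons w t ih =>
    simp only [List.foldl_cons, List.map_cons]
    have hstep : pvStepA bits mt mh (ob.map (·.2), ob.map (·.1)) w
        = (let b := pvStepB mh ob (pvDistB bits mt w, w); (b.map (·.2), b.map (·.1))) := by
      unfold pvStepA pvStepB
      rw [pvDistEq bits mt w]
      rcases ob with _ | q
      · by_cases hc : (decide (pvDistB bits mt w ≤ mh) && true) = true
        · simp [hc]
        · simp [hc]
      · by_cases hc : (decide (pvDistB bits mt w ≤ mh) && decide (pvDistB bits mt w < q.1)) = true
        · simp [hc]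
        · simp [hc]
    rw [hstep]
    exact ih (pvStepB mh ob (pvDistB bits mt w, w))

-- A's beam list is exactly B's scored list
theorem pvResultsEq (bits : List Int) (mt : List (String × List Int)) (lexicon : List String) :
    lexicon.foldl (fun acc w => acc ++ [(pvHammingA bits (pvBitsForWordA w mt), w)]) []
      = lexicon.map (fun w => (pvDistB bits mt w, w)) := by
  rw [PySem.List.foldl_append_singleton_eq_map]
  simp only [List.nil_append]
  exact List.map_congr_left (fun w _ => by rw [pvDistEq])

-- head of the stable sort = Python min on (dist, word) pairs: the lexicographic key is the pair itself
theorem pvBeamEqMin (bits : List Int) (mt : List (String × List Int)) (lexicon : List String) :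
    pvBeamFirstA bits mt lexicon
      = pvMinWordB (lexicon.map (fun w => (pvDistB bits mt w, w))) := by
  unfold pvBeamFirstA pvDecodeBitsBeamA pvMinWordB
  rw [pvResultsEq]
  set scored := lexicon.map (fun w => (pvDistB bits mt w, w)) with hs
  rcases hnil : scored with _ | ⟨p, rest⟩
  · simp [PySem.List.pyGet?, PySem.List.min?]
  · rw [← hnil]
    have hne : scored ≠ [] := by rw [hnil]; simp
    rcases hsort : PySem.List.sorted scored (fun p => toLex p) with _ | ⟨h, t⟩
    · exact absurd ((PySem.List.sorted_eq_nil_iff _ _ _).mp hsort) hne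
    · rcases hmin : PySem.List.min? scored (fun p => toLex p) with _ | m
      · exact absurd ((PySem.List.min?_eq_none_iff _ _).mp hmin) hne
      · have hm_mem : m ∈ scored := PySem.List.min?_mem hmin
        have hh_mem : h ∈ scored := by
          rw [← PySem.List.mem_sorted scored (fun p => toLex p) false, hsort]; simp
        have h1 : toLex h ≤ toLex m := PySem.List.key_head_sorted_le scored _ hsort m hm_mem
        have h2 : toLex m ≤ toLex h := PySem.List.min?_isMin hmin h hh_mem
        have : h = m := toLex.injective (le_antisymm h1 h2)
        subst this
        simp [hsort, PySem.List.pyGet?, PySem.List.pyIdx?]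

-- invariant of B's hard-search fold: a returned pair is in the list, qualifies, and is minimal
theorem pvFoldBInv (mh : Int) (l : List (Int × String)) :
    ∀ (b : Option (Int × String)) (q : Int × String),
      l.foldl (pvStepB mh) b = some q →
      (q ∈ l ∧ q.1 ≤ mh ∧ (∀ r ∈ l, r.1 ≤ mh → q.1 ≤ r.1) ∧ (∀ hb, b = some hb → q.1 < hb.1))
      ∨ (b = some q ∧ ∀ r ∈ l, r.1 ≤ mh → q.1 ≤ r.1) := by
  induction l with
  | nil => intro b q h; right; exact ⟨h, by simp⟩
  | cons p t ih =>
    intro b q h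
    simp only [List.foldl_cons] at h
    rcases b with _ | hb
    · by_cases hpm : p.1 ≤ mh
      · have hst : pvStepB mh none p = some p := by simp [pvStepB, hpm]
        rw [hst] at h
        rcases ih (some p) q h with ⟨hq, hqm, hmin, hlt⟩ | ⟨heq, hmin⟩
        · left
          refine ⟨List.mem_cons_of_mem _ hq, hqm, ?_, by simp⟩
          intro r hr hrm
          rcases List.mem_cons.mp hr with hr | hr
          · exact hr ▸ le_of_lt (hlt p rfl)
          · exact hmin r hr hrm
        · have hqp : q = p := by injection heq with h'; exact h'.symm
          subst hqp
          left
          refine ⟨List.mem_cons_self, hpm, ?_, by simp⟩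
          intro r hr hrm
          rcases List.mem_cons.mp hr with hr | hr
          · exact hr ▸ le_refl _
          · exact hmin r hr hrm
      · have hst : pvStepB mh none p = none := by simp [pvStepB, hpm]
        rw [hst] at h
        rcases ih none q h with ⟨hq, hqm, hmin, _⟩ | ⟨heq, _⟩
        · left
          refine ⟨List.mem_cons_of_mem _ hq, hqm, ?_, by simp⟩
          intro r hr hrm
          rcases List.mem_cons.mp hr with hr | hr
          · exact absurd (hr ▸ hrm) hpm
          · exact hmin r hr hrm
        · exact absurd heq (by simp)
    · by_cases hcond : p.1 ≤ mh ∧ p.1 < hb.1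
      · have hst : pvStepB mh (some hb) p = some p := by
          simp [pvStepB, hcond.1, hcond.2]
        rw [hst] at h
        rcases ih (some p) q h with ⟨hq, hqm, hmin, hlt⟩ | ⟨heq, hmin⟩
        · left
          refine ⟨List.mem_cons_of_mem _ hq, hqm, ?_, ?_⟩
          · intro r hr hrm
            rcases List.mem_cons.mp hr with hr | hr
            · exact hr ▸ le_of_lt (hlt p rfl)
            · exact hmin r hr hrm
          · intro hb' hbeq
            have : hb' = hb := by injection hbeq with h'; exact h'.symm
            subst this
            exact lt_trans (hlt p rfl) hcond.2
        · have hqp : q = p := by injection heq with h'; exact h'.symm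
          subst hqp
          left
          refine ⟨List.mem_cons_self, hcond.1, ?_, ?_⟩
          · intro r hr hrm
            rcases List.mem_cons.mp hr with hr | hr
            · exact hr ▸ le_refl _
            · exact hmin r hr hrm
          · intro hb' hbeq
            have : hb' = hb := by injection hbeq with h'; exact h'.symm
            subst this
            exact hcond.2
      · have hst : pvStepB mh (some hb) p = some hb := by
          unfold pvStepB
          rw [if_neg]
          simp only [Bool.and_eq_true, decide_eq_true_eq]
          exact fun hc => hcond ⟨hc.1, hc.2⟩
        rw [hst] at h
        rcases ih (some hb) q h with ⟨hq, hqm, hmin, hlt⟩ | ⟨heq, hmin⟩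
        · left
          refine ⟨List.mem_cons_of_mem _ hq, hqm, ?_, hlt⟩
          intro r hr hrm
          rcases List.mem_cons.mp hr with hr | hr
          · subst hr
            have hnl : hb.1 ≤ r.1 := not_lt.mp (fun hl => hcond ⟨hrm, hl⟩)
            exact le_trans (le_of_lt (hlt hb rfl)) hnl
          · exact hmin r hr hrm
        · have hqb : hb = q := by injection heq
          subst hqb
          right
          refine ⟨rfl, ?_⟩
          intro r hr hrm
          rcases List.mem_cons.mp hr with hr | hr
          · subst hr
            exact not_lt.mp (fun hl => hcond ⟨hrm, hl⟩)
          · exact hmin r hr hrm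

-- no string is below the empty string
theorem pvNotLtEmpty (s : String) : ¬ s < "" := by
  intro h
  have : s.toList < ("" : String).toList := by
    rcases s with ⟨l⟩
    simpa [String.lt_iff] using h
  simp at this

-- if a minimal pair has the empty word, the Python min over the list has it too
theorem pvMinEmptyStr (scored : List (Int × String)) (q : Int × String)
    (hq : q ∈ scored) (hmin : ∀ p ∈ scored, q.1 ≤ p.1) (h2 : q.2 = "") :
    pvMinWordB scored = "" := by
  unfold pvMinWordB
  rcases hm : PySem.List.min? scored (fun p => toLex p) with _ | m
  · exact absurd ((PySem.List.min?_eq_none_iff _ _).mp hm) (List.ne_nil_of_mem hq)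
  · have hm_mem : m ∈ scored := PySem.List.min?_mem hm
    have hle : toLex m ≤ toLex q := PySem.List.min?_isMin hm q hq
    have hfst : q.1 ≤ m.1 := hmin m hm_mem
    rcases Prod.Lex.le_iff.mp hle with hlt | ⟨heq, hsnd⟩
    · simp only [ofLex_toLex] at hlt
      exact absurd hlt (not_lt.mpr hfst)
    · simp only [ofLex_toLex] at hsnd
      rw [h2] at hsnd
      have : m.2 = "" := le_antisymm hsnd (not_lt.mp (pvNotLtEmpty m.2))
      simpa using this

-- ===== VERDICT (by name: the statement is the Claim_ definition above) =====
theorem decode_with_lexicon_or_estimate_spec : Claim_equal_decode_with_lexicon_or_estimate := by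
  intro bits mt lexicon mh _ _
  unfold Spec_decode_with_lexicon_or_estimate
  have hA : decode_with_lexicon_or_estimate bits mt lexicon mh
      = (match (lexicon.foldl (pvStepA bits mt mh) (none, none)).1 with
        | some w => if w ≠ "" then w else pvBeamFirstA bits mt lexicon
        | none => pvBeamFirstA bits mt lexicon) := rfl
  have hB : decode_with_lexicon_or_estimate_alt bits mt lexicon mh
      = (match (lexicon.map (fun w => (pvDistB bits mt w, w))).foldl (pvStepB mh) none with
        | some q => q.2
        | none => pvMinWordB (lexicon.map (fun w => (pvDistB bits mt w, w)))) := rfl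
  rw [hA, hB,
     show ((none, none) : Option String × Option Int)
        = ((none : Option (Int × String)).map (·.2), (none : Option (Int × String)).map (·.1)) from rfl,
     pvFoldCorr bits mt mh lexicon none]
  rcases hfold : (lexicon.map (fun w => (pvDistB bits mt w, w))).foldl (pvStepB mh) none with _ | q
  · simpa using pvBeamEqMin bits mt lexicon
  · by_cases hq : q.2 = ""
    · -- A falls through to the beam phase, which returns the empty word too
      rcases pvFoldBInv mh _ none q hfold with ⟨hmem, hqm, hmin, _⟩ | ⟨hcontra, _⟩
      · have hminall : ∀ p ∈ lexicon.map (fun w => (pvDistB bits mt w, w)), q.1 ≤ p.1 := by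
          intro p hp
          by_cases hpm : p.1 ≤ mh
          · exact hmin p hp hpm
          · exact le_trans hqm (le_of_lt (not_le.mp hpm))
        simp only [Option.map_some]
        rw [hq]
        simp only [ne_eq, not_true_eq_false, if_false]
        exact (pvBeamEqMin bits mt lexicon).trans
          (pvMinEmptyStr _ q hmem hminall hq)
      · exact absurd hcontra (by simp)
    · simp [hq]
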